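-- pv_equiv track=rewrite | github.com/messa/tools | trim.py | trim_line
-- ===== SOURCE A (Python) =====
-- def trim_line(line):
--     """
--     Remove ending whitespace from line.
--     """
--     n = len(line)
--     lineEnding = ""
--     while n > 0:
--         n -= 1
--         if line[n] in ("\r", "\n"):
--             lineEnding = line[n] + lineEnding
--         elif line[n] not in (" ", "\t"):
--             n += 1
--             break
--
--     return line[:n] + lineEnding
-- ===== SOURCE B (Python) =====
-- def trim_line(line):
--     """
--     Remove ending whitespace from line.
--     """
--     content = line.rstrip(" \t\r\n")
--     ending = "".join(c for c in line[len(content):] if c in ("\r", "\n"))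
--     return content + ending
-- ===== Notes on version B (the rewrite author's own statement) =====
-- stated objective: simpler
-- what changed: Replaces the fused backward index loop (strip and collect line-ending chars simultaneously with mutable n) by a two-pass decomposition: rstrip finds the content boundary, then a filter over the stripped suffix rebuilds the preserved CR/LF characters.
import Mathlib
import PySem

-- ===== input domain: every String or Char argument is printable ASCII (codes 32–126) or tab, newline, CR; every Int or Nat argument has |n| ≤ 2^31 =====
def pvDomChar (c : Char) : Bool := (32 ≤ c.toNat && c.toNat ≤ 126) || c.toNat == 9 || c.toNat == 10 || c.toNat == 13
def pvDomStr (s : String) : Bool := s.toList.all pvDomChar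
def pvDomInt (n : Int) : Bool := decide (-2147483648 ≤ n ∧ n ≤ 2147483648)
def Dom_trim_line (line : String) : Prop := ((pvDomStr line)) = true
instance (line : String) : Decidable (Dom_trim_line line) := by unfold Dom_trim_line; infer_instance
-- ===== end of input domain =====

-- B strips with rstrip then filters CR/LF out of the stripped suffix, instead of A's fused
-- backward loop with a mutable index; same O(n) cost, simpler two-pass decomposition.

-- ===== PORT A =====
-- A's while loop: decrement n, look at line[n]; the index is always in range (n starts at
-- len and only decreases while > 0), so List.getD is exact here.
def trim_line_loop (s : List Char) : Nat → List Char → Nat × List Char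
  | 0, acc => (0, acc)
  | m + 1, acc =>
    let c := s.getD m ' '
    if c = '\r' ∨ c = '\n' then trim_line_loop s m (c :: acc)
    else if c = ' ' ∨ c = '\t' then trim_line_loop s m acc
    else (m + 1, acc)

def trim_line (line : String) : String :=
  let s := line.toList
  let r := trim_line_loop s s.length []
  -- line[:n] with 0 ≤ n ≤ len is List.take
  String.mk (s.take r.1 ++ r.2)

-- ===== PORT B =====
def trim_line_alt (line : String) : String :=
  let s := line.toList
  -- line.rstrip(" \t\r\n")
  let content := (s.reverse.dropWhile (fun c => c = ' ' || c = '\t' || c = '\r' || c = '\n')).reverse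
  -- ''.join(c for c in line[len(content):] if c in ("\r","\n"))
  let ending := (s.drop content.length).filter (fun c => c = '\r' || c = '\n')
  String.mk (content ++ ending)

-- ===== PRECONDITION & SPEC =====
def Spec_trim_line (line : String) (out : String) : Prop := out = trim_line_alt line
instance (line : String) (out : String) : Decidable (Spec_trim_line line out) := by unfold Spec_trim_line; infer_instance

-- ===== CLAIM (what is proved, stated in full; the proofs are below) =====
def Claim_equal_trim_line : Prop := ∀ (line : String), Dom_trim_line line → Spec_trim_line line (trim_line line)

-- ===== LEMMAS AND PROOFS =====

-- The whitespace test, as a Bool predicate (definitionally B's rstrip set)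
def pvWs (c : Char) : Bool := c = ' ' || c = '\t' || c = '\r' || c = '\n'

-- A's loop as a pure function on the reversed processed prefix
def pvG : List Char → List Char → Nat × List Char
  | [], acc => (0, acc)
  | c :: r, acc =>
    if c = '\r' ∨ c = '\n' then pvG r (c :: acc)
    else if c = ' ' ∨ c = '\t' then pvG r acc
    else (r.length + 1, acc)

theorem trim_line_loop_eq_pvG (s : List Char) :
    ∀ n acc, n ≤ s.length → trim_line_loop s n acc = pvG (s.take n).reverse acc := by
  intro n
  induction n with
  | zero => intro acc _; simp [trim_line_loop, pvG]
  | succ m ih =>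
    intro acc h
    have hm : m < s.length := Nat.lt_of_succ_le h
    have htake : (s.take (m + 1)).reverse = s[m] :: (s.take m).reverse := by
      rw [List.take_succ]
      simp [List.getElem?_eq_getElem hm]
    have hget : s.getD m ' ' = s[m] := List.getD_eq_getElem s ' ' hm
    rw [htake]
    simp only [trim_line_loop, pvG, hget]
    split_ifs with h1 h2
    · rw [ih _ (Nat.le_of_lt hm)]
    · rw [ih _ (Nat.le_of_lt hm)]
    · simp [Nat.min_eq_left (Nat.le_of_lt hm)]

theorem pvG_spec : ∀ (r acc : List Char),
    pvG r acc = ((r.dropWhile pvWs).length,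
                 ((r.takeWhile pvWs).filter (fun c => c = '\r' || c = '\n')).reverse ++ acc) := by
  intro r
  induction r with
  | nil => intro acc; simp [pvG]
  | cons c r ih =>
    intro acc
    by_cases h1 : c = '\r' ∨ c = '\n'
    · have hws : pvWs c = true := by rcases h1 with h | h <;> simp [pvWs, h]
      have hcr : (decide (c = '\r') || decide (c = '\n')) = true := by
        rcases h1 with h | h <;> simp [h]
      simp [pvG, h1, ih, List.dropWhile_cons, List.takeWhile_cons, hws, List.filter_cons, hcr]
    · by_cases h2 : c = ' ' ∨ c = '\t'
      · have hws : pvWs c = true := by rcases h2 with h | h <;> simp [pvWs, h]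
        have hcr : (decide (c = '\r') || decide (c = '\n')) = false := by
          rcases not_or.mp h1 with ⟨ha, hb⟩; simp [ha, hb]
        simp [pvG, h1, h2, ih, List.dropWhile_cons, List.takeWhile_cons, hws,
              List.filter_cons, hcr]
      · have hws : pvWs c = false := by
          rcases not_or.mp h1 with ⟨ha, hb⟩; rcases not_or.mp h2 with ⟨hc, hd⟩
          simp [pvWs, ha, hb, hc, hd]
        simp [pvG, h1, h2, List.dropWhile_cons, List.takeWhile_cons, hws]

theorem trim_line_main (s : List Char) :
    s.take (trim_line_loop s s.length []).1 ++ (trim_line_loop s s.length []).2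
    = (s.reverse.dropWhile pvWs).reverse ++
        (s.drop (s.reverse.dropWhile pvWs).reverse.length).filter
          (fun c => c = '\r' || c = '\n') := by
  rw [trim_line_loop_eq_pvG s s.length [] (Nat.le_refl _), List.take_length, pvG_spec]
  have hsplit : s = (s.reverse.dropWhile pvWs).reverse ++ (s.reverse.takeWhile pvWs).reverse := by
    calc s = s.reverse.reverse := (List.reverse_reverse s).symm
    _ = (s.reverse.takeWhile pvWs ++ s.reverse.dropWhile pvWs).reverse := by
        rw [List.takeWhile_append_dropWhile]
    _ = _ := by rw [List.reverse_append]
  have htake : s.take (s.reverse.dropWhile pvWs).length = (s.reverse.dropWhile pvWs).reverse := by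
    have h := List.take_left' (l₁ := (s.reverse.dropWhile pvWs).reverse)
      (l₂ := (s.reverse.takeWhile pvWs).reverse) (i := (s.reverse.dropWhile pvWs).length)
      (List.length_reverse)
    rw [← hsplit] at h
    exact h
  have hdrop : s.drop (s.reverse.dropWhile pvWs).reverse.length
      = (s.reverse.takeWhile pvWs).reverse := by
    have h := List.drop_left (l₁ := (s.reverse.dropWhile pvWs).reverse)
      (l₂ := (s.reverse.takeWhile pvWs).reverse)
    rw [← hsplit] at h
    exact h
  rw [List.append_nil, htake, hdrop, List.filter_reverse]

-- ===== VERDICT (by name: the statement is the Claim_ definition above) =====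
theorem trim_line_spec : Claim_equal_trim_line := by
  intro line _
  show trim_line line = trim_line_alt line
  unfold trim_line trim_line_alt
  simp only [pvWs.eq_def]
  exact congrArg String.mk (trim_line_main line.toList)
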